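-- pv_equiv track=rewrite | github.com/teaguesterling/pluckit | src/pluckit/plugins/viewer.py | _scan_selector
-- ===== SOURCE A (Python) =====
-- def _scan_selector(query: str, start: int) -> tuple[str, int]:
--     """Scan a selector starting at *start*. Returns (text, new_pos).
--
--     Stops at the first top-level `{` (not inside `[...]` or quotes).
--     """
--     pos = start
--     n = len(query)
--     bracket_depth = 0
--     in_single = False
--     in_double = False
--     escaped = False
--
--     while pos < n:
--         ch = query[pos]
--         if escaped:
--             escaped = False
--             pos += 1
--             continue
--         if ch == '\\':
--             escaped = True
--             pos += 1
--             continue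
--         if in_single:
--             if ch == "'":
--                 in_single = False
--             pos += 1
--             continue
--         if in_double:
--             if ch == '"':
--                 in_double = False
--             pos += 1
--             continue
--         if ch == "'":
--             in_single = True
--             pos += 1
--             continue
--         if ch == '"':
--             in_double = True
--             pos += 1
--             continue
--         if ch == '[':
--             bracket_depth += 1
--             pos += 1
--             continue
--         if ch == ']':
--             if bracket_depth > 0:
--                 bracket_depth -= 1
--             pos += 1
--             continue
--         if ch == '{' and bracket_depth == 0:
--             return query[start:pos], pos
--         if ch == '}' and bracket_depth == 0:
--             # End of previous block spilled into scanner — stop here so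
--             # the outer loop can advance past the brace.
--             return query[start:pos], pos
--         pos += 1
--
--     return query[start:pos], pos
-- ===== SOURCE B (Python) =====
-- def _scan_selector(query: str, start: int) -> tuple[str, int]:
--     """Scan a selector starting at *start*; stop at the first top-level brace."""
--     n = len(query)
--     pos = start
--     bracket_depth = 0
--     while pos < n:
--         ch = query[pos]
--         if ch == '\\':
--             pos = min(pos + 2, n)
--         elif ch == "'" or ch == '"':
--             pos = _skip_string(query, pos + 1, ch, n)
--         elif ch == '[':
--             bracket_depth += 1
--             pos += 1
--         elif ch == ']':
--             bracket_depth = max(bracket_depth - 1, 0)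
--             pos += 1
--         elif (ch == '{' or ch == '}') and bracket_depth == 0:
--             return query[start:pos], pos
--         else:
--             pos += 1
--     return query[start:pos], pos
--
--
-- def _skip_string(query: str, pos: int, quote: str, n: int) -> int:
--     """Return the position just past the closing *quote*, honouring backslash escapes."""
--     while pos < n:
--         ch = query[pos]
--         if ch == '\\':
--             pos = min(pos + 2, n)
--         elif ch == quote:
--             return pos + 1
--         else:
--             pos += 1
--     return pos
-- ===== Notes on version B (the rewrite author's own statement) =====
-- stated objective: alternative
-- what changed: A's single while-loop driving a four-flag state machine (bracket_depth, in_single, in_double, escaped) is replaced by a loop that keeps only bracket_depth and delegates quoted sections to a separate escape-aware _skip_string helper, handling a top-level backslash by jumping two positions.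
import Mathlib
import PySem

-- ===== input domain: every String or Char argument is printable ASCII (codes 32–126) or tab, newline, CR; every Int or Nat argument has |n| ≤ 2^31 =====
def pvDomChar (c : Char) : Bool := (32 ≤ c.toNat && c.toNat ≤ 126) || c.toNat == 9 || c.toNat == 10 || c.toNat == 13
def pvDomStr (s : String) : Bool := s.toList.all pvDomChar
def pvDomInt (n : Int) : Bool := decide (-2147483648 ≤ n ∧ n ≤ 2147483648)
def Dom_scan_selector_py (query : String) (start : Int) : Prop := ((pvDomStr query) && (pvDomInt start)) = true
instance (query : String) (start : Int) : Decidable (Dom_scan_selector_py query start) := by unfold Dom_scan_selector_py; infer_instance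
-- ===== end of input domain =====

-- B changes the decomposition (one bracket-depth loop plus a separate quote-skipping helper instead of A's four-flag state machine); equal return values on Pre_.
-- Totality guard on both ports: a Nat fuel bounding the remaining loop iterations ((n - pos).toNat suffices: pos grows by ≥ 1 per step).

-- ===== PORT A =====
-- A's single while-loop with state (pos, bracket_depth, in_single, in_double, escaped),
-- branch for branch in A's order; pyGet? = none (query[pos] IndexError, outside Pre_) stops at pos.
def scanSelA (q : List Char) (n : Int) : Nat → Int → Int → Bool → Bool → Bool → Int
  | 0, pos, _, _, _, _ => pos
  | fuel + 1, pos, bd, ins, ind, esc =>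
    if pos < n then
      match PySem.List.pyGet? q pos with
      | none => pos
      | some ch =>
        if esc then scanSelA q n fuel (pos + 1) bd ins ind false
        else if ch = '\\' then scanSelA q n fuel (pos + 1) bd ins ind true
        else if ins then scanSelA q n fuel (pos + 1) bd (if ch = '\'' then false else ins) ind esc
        else if ind then scanSelA q n fuel (pos + 1) bd ins (if ch = '"' then false else ind) esc
        else if ch = '\'' then scanSelA q n fuel (pos + 1) bd true ind esc
        else if ch = '"' then scanSelA q n fuel (pos + 1) bd ins true esc
        else if ch = '[' then scanSelA q n fuel (pos + 1) (bd + 1) ins ind esc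
        else if ch = ']' then scanSelA q n fuel (pos + 1) (if bd > 0 then bd - 1 else bd) ins ind esc
        else if ch = '{' ∧ bd = 0 then pos
        else if ch = '}' ∧ bd = 0 then pos
        else scanSelA q n fuel (pos + 1) bd ins ind esc
    else pos

def scan_selector_py (query : String) (start : Int) : String × Int :=
  let n : Int := (query.toList.length : Int)
  let p := scanSelA query.toList n (n - start).toNat start 0 false false false
  (PySem.Str.slice query (some start) (some p), p)

-- ===== PORT B =====
-- B's _skip_string helper: scan forward past the matching close quote, honouring backslash escapes.
def skipStrB (q : List Char) (n : Int) : Nat → Int → Char → Int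
  | 0, pos, _ => pos
  | fuel + 1, pos, quote =>
    if pos < n then
      match PySem.List.pyGet? q pos with
      | none => pos
      | some ch =>
        if ch = '\\' then skipStrB q n fuel (min (pos + 2) n) quote
        else if ch = quote then pos + 1
        else skipStrB q n fuel (pos + 1) quote
    else pos

-- B's outer loop: only bracket_depth is carried; quotes are delegated to skipStrB.
def loopB (q : List Char) (n : Int) : Nat → Int → Int → Int
  | 0, pos, _ => pos
  | fuel + 1, pos, bd =>
    if pos < n then
      match PySem.List.pyGet? q pos with
      | none => pos
      | some ch =>
        if ch = '\\' then loopB q n fuel (min (pos + 2) n) bd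
        else if ch = '\'' ∨ ch = '"' then loopB q n fuel (skipStrB q n fuel (pos + 1) ch) bd
        else if ch = '[' then loopB q n fuel (pos + 1) (bd + 1)
        else if ch = ']' then loopB q n fuel (pos + 1) (max (bd - 1) 0)
        else if (ch = '{' ∨ ch = '}') ∧ bd = 0 then pos
        else loopB q n fuel (pos + 1) bd
    else pos

def scan_selector_py_alt (query : String) (start : Int) : String × Int :=
  let n : Int := (query.toList.length : Int)
  let p := loopB query.toList n (n - start).toNat start 0
  (PySem.Str.slice query (some start) (some p), p)

-- ===== PRECONDITION & SPEC =====
-- Pre_ excludes exactly the inputs where A raises IndexError: start < -len(query)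
-- (query[pos] with pos below -len raises on the first iteration).
def Pre_scan_selector_py (query : String) (start : Int) : Prop :=
  -(query.toList.length : Int) ≤ start
instance (query : String) (start : Int) : Decidable (Pre_scan_selector_py query start) := by
  unfold Pre_scan_selector_py; infer_instance

def pvWitness_scan_selector_py : String × Int := ("a['{x}'] { b }", 0)

def Spec_scan_selector_py (query : String) (start : Int) (out : String × Int) : Prop := out = scan_selector_py_alt query start
instance (query : String) (start : Int) (out : String × Int) : Decidable (Spec_scan_selector_py query start out) := by unfold Spec_scan_selector_py; infer_instance

-- ===== CLAIM (what is proved, stated in full; the proofs are below) =====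
def Claim_equal_scan_selector_py : Prop := ∀ (query : String) (start : Int), Dom_scan_selector_py query start → Pre_scan_selector_py query start → Spec_scan_selector_py query start (scan_selector_py query start)

-- ===== LEMMAS AND PROOFS =====

theorem skipStrB_ge (q : List Char) (n : Int) (quote : Char) :
    ∀ (f : Nat) (pos : Int), pos ≤ skipStrB q n f pos quote := by
  intro f
  induction f with
  | zero => intro pos; simp [skipStrB]
  | succ f ih =>
    intro pos
    simp only [skipStrB]
    split
    · split
      · exact le_refl pos
      · split
        · have := ih (min (pos + 2) n); rename_i hlt _ _; omega
        · split
          · omega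
          · have := ih (pos + 1); omega
    · exact le_refl pos

theorem skipStrB_irrel (q : List Char) (n : Int) (quote : Char) :
    ∀ (f g : Nat) (pos : Int), (n - pos).toNat ≤ f → (n - pos).toNat ≤ g →
      skipStrB q n f pos quote = skipStrB q n g pos quote := by
  intro f
  induction f with
  | zero =>
    intro g pos hf _
    cases g with
    | zero => rfl
    | succ g => simp only [skipStrB]; rw [if_neg (by omega)]
  | succ f ih =>
    intro g pos hf hg
    cases g with
    | zero => simp only [skipStrB]; rw [if_neg (by omega)]
    | succ g =>
      simp only [skipStrB]
      by_cases hlt : pos < n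
      · rw [if_pos hlt, if_pos hlt]
        cases hch : PySem.List.pyGet? q pos with
        | none => rfl
        | some ch =>
          simp only
          split
          · exact ih g (min (pos + 2) n) (by omega) (by omega)
          · split
            · rfl
            · exact ih g (pos + 1) (by omega) (by omega)
      · rw [if_neg hlt, if_neg hlt]

theorem loopB_irrel (q : List Char) (n : Int) :
    ∀ (f g : Nat) (pos bd : Int), (n - pos).toNat ≤ f → (n - pos).toNat ≤ g →
      loopB q n f pos bd = loopB q n g pos bd := by
  intro f
  induction f with
  | zero =>
    intro g pos bd hf _
    cases g with
    | zero => rfl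
    | succ g => simp only [loopB]; rw [if_neg (by omega)]
  | succ f ih =>
    intro g pos bd hf hg
    cases g with
    | zero => simp only [loopB]; rw [if_neg (by omega)]
    | succ g =>
      simp only [loopB]
      by_cases hlt : pos < n
      · rw [if_pos hlt, if_pos hlt]
        cases hch : PySem.List.pyGet? q pos with
        | none => rfl
        | some ch =>
          simp only
          split
          · exact ih g (min (pos + 2) n) bd (by omega) (by omega)
          · split
            · rw [skipStrB_irrel q n ch f g (pos + 1) (by omega) (by omega)]
              have hge := skipStrB_ge q n ch g (pos + 1)
              exact ih g (skipStrB q n g (pos + 1) ch) bd (by omega) (by omega)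
            · split
              · exact ih g (pos + 1) (bd + 1) (by omega) (by omega)
              · split
                · exact ih g (pos + 1) (max (bd - 1) 0) (by omega) (by omega)
                · split
                  · rfl
                  · exact ih g (pos + 1) bd (by omega) (by omega)
      · rw [if_neg hlt, if_neg hlt]

-- the coupling invariant: A's four-flag state machine against B's two loops, at canonical fuel
theorem coupling (q : List Char) (f : Nat) :
    ∀ pos bd : Int, -(q.length : Int) ≤ pos → 0 ≤ bd → ((q.length : Int) - pos).toNat = f →
      (scanSelA q q.length (((q.length : Int) - pos).toNat) pos bd false false false
         = loopB q q.length (((q.length : Int) - pos).toNat) pos bd)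
      ∧ (∀ quote : Char, (quote = '\'' ∨ quote = '"') →
          scanSelA q q.length (((q.length : Int) - pos).toNat) pos bd (decide (quote = '\'')) (decide (quote = '"')) false
            = loopB q q.length (((q.length : Int) - pos).toNat)
                (skipStrB q q.length (((q.length : Int) - pos).toNat) pos quote) bd)
      ∧ (pos ≤ (q.length : Int) →
          scanSelA q q.length (((q.length : Int) - pos).toNat) pos bd false false true
            = loopB q q.length (((q.length : Int) - pos).toNat) (min (pos + 1) (q.length : Int)) bd)
      ∧ (∀ quote : Char, (quote = '\'' ∨ quote = '"') → pos ≤ (q.length : Int) →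
          scanSelA q q.length (((q.length : Int) - pos).toNat) pos bd (decide (quote = '\'')) (decide (quote = '"')) true
            = loopB q q.length (((q.length : Int) - pos).toNat)
                (skipStrB q q.length (((q.length : Int) - pos).toNat) (min (pos + 1) (q.length : Int)) quote) bd) := by
  induction f with
  | zero =>
    intro pos bd hpre hbd hf
    rw [hf]
    refine ⟨by simp [scanSelA, loopB], fun quote _ => by simp [scanSelA, skipStrB, loopB], ?_, ?_⟩
    · intro hle
      simp only [scanSelA, loopB]
      omega
    · intro quote _ hle
      simp only [scanSelA, skipStrB, loopB]
      omega
  | succ f ih =>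
    intro pos bd hpre hbd hf
    have hlt : pos < (q.length : Int) := by omega
    obtain ⟨ch, hch⟩ : ∃ c, PySem.List.pyGet? q pos = some c := by
      cases h : PySem.List.pyGet? q pos with
      | none =>
        rw [PySem.List.pyGet?_eq_none_iff] at h
        exact absurd (by constructor <;> omega) h
      | some c => exact ⟨c, rfl⟩
    have hf' : ((q.length : Int) - (pos + 1)).toNat = f := by omega
    rw [hf]
    refine ⟨?_, ?_, ?_, ?_⟩
    · -- S1 : top level
      simp only [scanSelA, loopB]
      rw [if_pos hlt, if_pos hlt]
      simp only [hch]
      by_cases h1 : ch = '\\'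
      · simp only [h1, Bool.false_eq_true, if_false, reduceIte]
        have := (ih (pos + 1) bd (by omega) hbd hf').2.2.1 (by omega)
        rw [hf', show pos + 1 + 1 = pos + 2 by ring] at this
        simpa using this
      · by_cases h2 : ch = '\''
        · simp only [h2, Bool.false_eq_true, if_false, reduceIte]
          have := (ih (pos + 1) bd (by omega) hbd hf').2.1 '\'' (Or.inl rfl)
          rw [hf'] at this
          simpa using this
        · by_cases h3 : ch = '"'
          · simp only [h3, Bool.false_eq_true, if_false, reduceIte]
            have := (ih (pos + 1) bd (by omega) hbd hf').2.1 '"' (Or.inr rfl)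
            rw [hf'] at this
            simpa using this
          · have hq : ¬ (ch = '\'' ∨ ch = '"') := by tauto
            by_cases h4 : ch = '['
            · simp only [h4, Bool.false_eq_true, if_false, reduceIte]
              have := (ih (pos + 1) (bd + 1) (by omega) (by omega) hf').1
              rw [hf'] at this
              simpa using this
            · by_cases h5 : ch = ']'
              · simp only [h5, Bool.false_eq_true, if_false, reduceIte]
                have heq : (if bd > 0 then bd - 1 else bd) = max (bd - 1) 0 := by omega
                have := (ih (pos + 1) (max (bd - 1) 0) (by omega) (by omega) hf').1
                rw [hf'] at this
                simp only [heq]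
                simpa using this
              · by_cases h6 : (ch = '{' ∨ ch = '}') ∧ bd = 0
                · rcases h6 with ⟨h6a, h6b⟩
                  rcases h6a with h6a | h6a <;>
                    simp [h6a, h6b]
                · have h7 : ¬ (ch = '{' ∧ bd = 0) := by tauto
                  have h8 : ¬ (ch = '}' ∧ bd = 0) := by tauto
                  simp only [Bool.false_eq_true, if_false, if_neg h1, if_neg h2, if_neg h3,
                    if_neg h4, if_neg h5, if_neg hq, if_neg h6, if_neg h7, if_neg h8]
                  have := (ih (pos + 1) bd (by omega) hbd hf').1
                  rw [hf'] at this
                  exact this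
    · -- S2 : inside a quote
      intro quote hq
      simp only [skipStrB]
      rw [if_pos hlt]
      simp only [hch]
      simp only [scanSelA]
      rw [if_pos hlt]
      simp only [hch]
      by_cases h1 : ch = '\\'
      · simp only [h1, Bool.false_eq_true, if_false, reduceIte]
        have := (ih (pos + 1) bd (by omega) hbd hf').2.2.2 quote hq (by omega)
        rw [hf', show pos + 1 + 1 = pos + 2 by ring] at this
        have houter : loopB q q.length (f + 1) (skipStrB q q.length f (min (pos + 2) (q.length : Int)) quote) bd
            = loopB q q.length f (skipStrB q q.length f (min (pos + 2) (q.length : Int)) quote) bd := by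
          have hge := skipStrB_ge q q.length quote f (min (pos + 2) (q.length : Int))
          exact loopB_irrel q q.length (f + 1) f _ bd (by omega) (by omega)
        rw [houter]
        simpa using this
      · by_cases h2 : ch = quote
        · have houter : loopB q q.length (f + 1) (pos + 1) bd = loopB q q.length f (pos + 1) bd :=
            loopB_irrel q q.length (f + 1) f (pos + 1) bd (by omega) (by omega)
          have h1' := (ih (pos + 1) bd (by omega) hbd hf').1
          rw [hf'] at h1'
          rcases hq with hq | hq <;> subst hq <;> subst h2 <;>
            simp only [decide_true, if_true, if_neg h1, Bool.false_eq_true, if_false,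
              decide_eq_true_eq]
          · rw [houter]; exact h1'
          · rw [houter]; exact h1'
        · have houter : loopB q q.length (f + 1) (skipStrB q q.length f (pos + 1) quote) bd
              = loopB q q.length f (skipStrB q q.length f (pos + 1) quote) bd := by
            have hge := skipStrB_ge q q.length quote f (pos + 1)
            exact loopB_irrel q q.length (f + 1) f _ bd (by omega) (by omega)
          rcases hq with hq | hq <;> subst hq
          · simp only [decide_true, if_true, if_neg h1, if_neg h2,
              Bool.false_eq_true, if_false]
            rw [houter]
            have := (ih (pos + 1) bd (by omega) hbd hf').2.1 '\'' (Or.inl rfl)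
            rw [hf'] at this
            simpa [h2] using this
          · simp only [decide_true, if_true, if_neg h1, if_neg h2,
              Bool.false_eq_true, if_false]
            rw [houter]
            have := (ih (pos + 1) bd (by omega) hbd hf').2.1 '"' (Or.inr rfl)
            rw [hf'] at this
            simpa [h2] using this
    · -- S3 : escaped at top level
      intro _
      simp only [scanSelA]
      rw [if_pos hlt]
      simp only [hch]
      rw [min_eq_left (by omega : pos + 1 ≤ (q.length : Int))]
      have houter : loopB q q.length (f + 1) (pos + 1) bd = loopB q q.length f (pos + 1) bd :=
        loopB_irrel q q.length (f + 1) f (pos + 1) bd (by omega) (by omega)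
      rw [houter]
      have := (ih (pos + 1) bd (by omega) hbd hf').1
      rw [hf'] at this
      exact this
    · -- S4 : escaped inside a quote
      intro quote hq _
      simp only [scanSelA]
      rw [if_pos hlt]
      simp only [hch]
      rw [min_eq_left (by omega : pos + 1 ≤ (q.length : Int))]
      have hinner : skipStrB q q.length (f + 1) (pos + 1) quote
          = skipStrB q q.length f (pos + 1) quote :=
        skipStrB_irrel q q.length quote (f + 1) f (pos + 1) (by omega) (by omega)
      have houter : loopB q q.length (f + 1) (skipStrB q q.length f (pos + 1) quote) bd
          = loopB q q.length f (skipStrB q q.length f (pos + 1) quote) bd := by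
        have hge := skipStrB_ge q q.length quote f (pos + 1)
        exact loopB_irrel q q.length (f + 1) f _ bd (by omega) (by omega)
      rw [hinner, houter]
      have := (ih (pos + 1) bd (by omega) hbd hf').2.1 quote hq
      rw [hf'] at this
      exact this

-- ===== VERDICT (by name: the statement is the Claim_ definition above) =====
theorem scan_selector_py_spec : Claim_equal_scan_selector_py := by
  intro query start _ hpre
  unfold Spec_scan_selector_py scan_selector_py scan_selector_py_alt
  have h := (coupling query.toList (((query.toList.length : Int) - start).toNat) start 0
      hpre le_rfl rfl).1
  simp only [h]
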